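-- pv_equiv track=rewrite | github.com/zoeezhang3/CodePath | session2_unit2.py | organize_exhibition
-- ===== SOURCE A (Python) =====
-- from collections import Counter, defaultdict
--
-- def organize_exhibition(collection):
--   count_dict = Counter(collection)
--   two_d_arr = []
--
--   while any(count_dict.values()):       # the loop will stop when all the values are 0
--     two_d_arr_row = []
--     for key in count_dict:
--       if count_dict[key] > 0:
--         two_d_arr_row.append(key)
--         count_dict[key] -= 1
--     two_d_arr.append(two_d_arr_row)
--
--   return two_d_arr
-- ===== SOURCE B (Python) =====
-- from collections import Counter
--
-- def organize_exhibition(collection):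
--   rows = []
--   for key, cnt in Counter(collection).items():
--     for i in range(cnt):
--       if i == len(rows):
--         rows.append([])
--       rows[i].append(key)
--   return rows
-- ===== Notes on version B (the rewrite author's own statement) =====
-- stated objective: faster
-- what changed: Instead of repeatedly sweeping the whole counter once per row (one pass per maximum multiplicity), B visits each distinct key once and appends it to rows 0..count-1 directly, creating a new row when needed.
import Mathlib
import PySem

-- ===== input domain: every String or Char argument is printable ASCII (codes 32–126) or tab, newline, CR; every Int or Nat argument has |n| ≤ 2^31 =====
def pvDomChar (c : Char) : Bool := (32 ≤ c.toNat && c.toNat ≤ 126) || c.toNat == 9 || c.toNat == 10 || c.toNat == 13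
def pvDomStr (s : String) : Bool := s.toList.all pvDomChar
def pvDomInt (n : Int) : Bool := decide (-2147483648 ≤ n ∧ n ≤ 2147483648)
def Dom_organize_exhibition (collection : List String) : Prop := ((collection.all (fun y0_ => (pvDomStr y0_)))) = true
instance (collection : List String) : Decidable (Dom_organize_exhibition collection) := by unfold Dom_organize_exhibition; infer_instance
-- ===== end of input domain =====

-- B replaces A's repeated full sweeps of the counter (one sweep per row) by a single pass over
-- the counter that appends each key to rows 0..count-1 directly; return values are proved equal.

-- ===== PORT A =====
-- one iteration of A's `for key in count_dict` body: state = (two_d_arr_row, count_dict)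
def axStep (st : List String × PySem.Dict String Int) (k : String) :
    List String × PySem.Dict String Int :=
  if 0 < st.2.getD k 0 then (st.1 ++ [k], st.2.insert k (st.2.getD k 0 - 1)) else st

-- A's while loop; fuel bounds the number of iterations (the loop runs at most max-count ≤
-- collection.length times, so with fuel = collection.length the guard, not the fuel, stops it)
def axLoop : Nat → PySem.Dict String Int → List (List String) → List (List String)
  | 0, _, acc => acc
  | fuel + 1, d, acc =>
    if d.values.any (fun v => !(v == 0)) then
      let st := d.keys.foldl axStep ([], d)
      axLoop fuel st.2 (acc ++ [st.1])
    else acc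

def organize_exhibition (collection : List String) : List (List String) :=
  axLoop collection.length (PySem.Dict.counter collection) []

-- ===== PORT B =====
-- body of B's inner `for i in range(cnt)` loop: maybe-append a fresh row, then rows[i].append(key)
def bxInner (k : String) (rows : List (List String)) (i : Int) : List (List String) :=
  let rows := if i = (rows.length : Int) then rows ++ [[]] else rows
  rows.set i.toNat (rows.getD i.toNat [] ++ [k])

def organize_exhibition_alt (collection : List String) : List (List String) :=
  (PySem.Dict.counter collection).items.foldl
    (fun rows p => (PySem.List.pyRange 0 p.2 1).foldl (bxInner p.1) rows) []

-- ===== PRECONDITION & SPEC =====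
def Spec_organize_exhibition (collection : List String) (out : List (List String)) : Prop := out = organize_exhibition_alt collection
instance (collection : List String) (out : List (List String)) : Decidable (Spec_organize_exhibition collection out) := by unfold Spec_organize_exhibition; infer_instance

-- ===== CLAIM (what is proved, stated in full; the proofs are below) =====
def Claim_equal_organize_exhibition : Prop := ∀ (collection : List String), Dom_organize_exhibition collection → Spec_organize_exhibition collection (organize_exhibition collection)

-- ===== LEMMAS AND PROOFS =====
-- both programs are proved equal to pvTab (counter c).items, whose row j lists the keys of
-- multiplicity > j in first-insertion order
def pvDec (p : String × Int) : String × Int := if 0 < p.2 then (p.1, p.2 - 1) else p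


lemma pv_get?_mk_append (pre : List (String × Int)) (k : String) (v : Int) (rest : List (String × Int))
    (h : k ∉ pre.map (·.1)) :
    (PySem.Dict.mk (pre ++ (k, v) :: rest)).get? k = some v := by
  induction pre with
  | nil => rw [List.nil_append, PySem.Dict.get?_mk_cons]; simp
  | cons q pre ih =>
    simp only [List.map_cons, List.mem_cons, not_or] at h
    rw [List.cons_append,
      show (PySem.Dict.mk (q :: (pre ++ (k, v) :: rest))) = PySem.Dict.mk ((q.1, q.2) :: (pre ++ (k, v) :: rest)) from rfl,
      PySem.Dict.get?_mk_cons]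
    have : (q.1 == k) = false := by
      simp only [beq_eq_false_iff_ne, ne_eq]
      exact fun hq => h.1 hq.symm
    rw [this]; exact ih h.2

lemma pv_getD_mk_append (pre : List (String × Int)) (k : String) (v : Int) (rest : List (String × Int))
    (h : k ∉ pre.map (·.1)) :
    (PySem.Dict.mk (pre ++ (k, v) :: rest)).getD k 0 = v := by
  rw [PySem.Dict.getD_eq_get?_getD, pv_get?_mk_append pre k v rest h]; rfl

lemma pv_insert_mk_append (pre : List (String × Int)) (k : String) (v w : Int) (rest : List (String × Int))
    (hpre : k ∉ pre.map (·.1)) (hrest : k ∉ rest.map (·.1)) :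
    (PySem.Dict.mk (pre ++ (k, v) :: rest)).insert k w = PySem.Dict.mk (pre ++ (k, w) :: rest) := by
  apply PySem.Dict.ext
  have hc : (PySem.Dict.mk (pre ++ (k, v) :: rest)).contains k = true := by
    rw [PySem.Dict.contains_eq_isSome_get?, pv_get?_mk_append pre k v rest hpre]; rfl
  rw [PySem.Dict.items_insert, if_pos hc]
  show (pre ++ (k, v) :: rest).map _ = pre ++ (k, w) :: rest
  rw [List.map_append, List.map_cons]
  congr 1
  · conv_rhs => rw [show pre = pre.map id from (List.map_id pre).symm]
    apply List.map_congr_left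
    intro p hp
    have : (p.1 == k) = false := by
      simp only [beq_eq_false_iff_ne, ne_eq]
      intro h
      exact hpre (h ▸ List.mem_map_of_mem hp)
    simp [this]
  · congr 1
    · simp
    · conv_rhs => rw [show rest = rest.map id from (List.map_id rest).symm]
      apply List.map_congr_left
      intro p hp
      have : (p.1 == k) = false := by
        simp only [beq_eq_false_iff_ne, ne_eq]
        intro h
        exact hrest (h ▸ List.mem_map_of_mem hp)
      simp [this]

-- A's inner for-loop over the keys
lemma pv_foldl_axStep (post : List (String × Int)) : ∀ (pre : List (String × Int)) (row : List String),
    ((pre ++ post).map (·.1)).Nodup →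
    (post.map (·.1)).foldl axStep (row, PySem.Dict.mk (pre ++ post))
      = (row ++ (post.filter (fun p => decide (0 < p.2))).map (·.1),
         PySem.Dict.mk (pre ++ post.map pvDec)) := by
  induction post with
  | nil => intro pre row _; simp
  | cons p post ih =>
    intro pre row hnd
    obtain ⟨k, v⟩ := p
    have hkpre : k ∉ pre.map (·.1) := by
      have := hnd
      rw [List.map_append, List.nodup_append] at this
      exact fun hm => this.2.2 k hm k (by simp) rfl
    have hkpost : k ∉ post.map (·.1) := by
      have := hnd
      rw [List.map_append, List.nodup_append] at this
      have := this.2.1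
      rw [List.map_cons, List.nodup_cons] at this
      exact this.1
    rw [List.map_cons, List.foldl_cons]
    have hstep : axStep (row, PySem.Dict.mk (pre ++ (k, v) :: post)) k
        = (if 0 < v then row ++ [k] else row,
           PySem.Dict.mk ((pre ++ [pvDec (k, v)]) ++ post)) := by
      rw [axStep]
      simp only [pv_getD_mk_append pre k v post hkpre]
      by_cases hv : 0 < v
      · rw [if_pos hv, if_pos hv, pv_insert_mk_append pre k v (v - 1) post hkpre hkpost]
        simp [pvDec, hv]
      · rw [if_neg hv, if_neg hv]
        simp [pvDec, hv]
    rw [hstep]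
    have hnd' : (((pre ++ [pvDec (k, v)]) ++ post).map (·.1)).Nodup := by
      have : ((pre ++ [pvDec (k, v)]) ++ post).map (·.1) = (pre ++ (k, v) :: post).map (·.1) := by
        simp [pvDec]; by_cases hv : 0 < v <;> simp [hv]
      rw [this]; exact hnd
    rw [ih (pre ++ [pvDec (k, v)]) _ hnd']
    by_cases hv : 0 < v <;>
      simp [hv, pvDec, List.append_assoc]

def pvRowAt (items : List (String × Int)) (j : Nat) : List String :=
  (items.filter (fun p => decide ((j : Int) < p.2))).map (·.1)
def pvMaxC (items : List (String × Int)) : Nat :=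
  items.foldr (fun p m => max p.2.toNat m) 0
def pvTab (items : List (String × Int)) : List (List String) :=
  (List.range (pvMaxC items)).map (pvRowAt items)
def pvSumC (items : List (String × Int)) : Nat := (items.map (fun p => p.2.toNat)).sum

lemma pv_maxC_append (xs : List (String × Int)) (p : String × Int) :
    pvMaxC (xs ++ [p]) = max (pvMaxC xs) p.2.toNat := by
  induction xs with
  | nil => simp [pvMaxC]
  | cons q xs ih => simp [pvMaxC] at ih ⊢; omega

lemma pv_mem_le_maxC (items : List (String × Int)) (p : String × Int) (hp : p ∈ items) :
    p.2.toNat ≤ pvMaxC items := by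
  induction items with
  | nil => cases hp
  | cons q items ih =>
    rcases List.mem_cons.mp hp with rfl | hm
    · simp only [pvMaxC, List.foldr_cons]
      exact le_max_left _ _
    · simp only [pvMaxC, List.foldr_cons]
      exact le_max_of_le_right (ih hm)

lemma pv_rowAt_succ (items : List (String × Int)) (j : Nat) :
    pvRowAt items (j + 1) = pvRowAt (items.map pvDec) j := by
  unfold pvRowAt
  rw [List.filter_map]
  rw [List.map_map]
  have h1 : (fun p => decide ((j : Int) < p.2)) ∘ pvDec = fun p => decide (((j + 1 : Nat) : Int) < p.2) := by
    funext p
    simp only [Function.comp, pvDec]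
    by_cases hv : 0 < p.2 <;> simp [hv] <;> omega
  have h2 : ((fun x => x.1) ∘ pvDec) = fun (p : String × Int) => p.1 := by
    funext p; simp [Function.comp, pvDec]; by_cases hv : 0 < p.2 <;> simp [hv]
  rw [h1, h2]

lemma pv_maxC_dec (items : List (String × Int)) (h : ∀ p ∈ items, 0 ≤ p.2) :
    pvMaxC (items.map pvDec) = pvMaxC items - 1 := by
  induction items with
  | nil => simp [pvMaxC]
  | cons q items ih =>
    have hq := h q (by simp)
    have ih' := ih (fun p hp => h p (List.mem_cons_of_mem q hp))
    simp only [List.map_cons, pvMaxC, List.foldr_cons] at ih' ⊢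
    have hdq : (pvDec q).2.toNat = q.2.toNat - 1 := by
      simp [pvDec]; by_cases hv : 0 < q.2 <;> simp [hv] <;> omega
    rw [hdq, ih']
    omega

lemma pv_sumC_dec (items : List (String × Int)) (h : ∃ p ∈ items, 0 < p.2) :
    pvSumC (items.map pvDec) < pvSumC items := by
  induction items with
  | nil => simp at h
  | cons q items ih =>
    have hdle : (pvDec q).2.toNat ≤ q.2.toNat := by
      simp [pvDec]; by_cases hv : 0 < q.2 <;> simp [hv] <;> omega
    simp only [List.map_cons, pvSumC, List.map_cons, List.sum_cons] at ih ⊢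
    rcases h with ⟨p, hp, hpos⟩
    rcases List.mem_cons.mp hp with rfl | hm
    · have hlt : (pvDec p).2.toNat < p.2.toNat := by
        simp only [pvDec, if_pos hpos]
        omega
      have : pvSumC (items.map pvDec) ≤ pvSumC items := by
        clear ih hlt hp hpos hdle
        induction items with
        | nil => simp [pvSumC]
        | cons r items ih2 =>
          simp only [List.map_cons, pvSumC, List.sum_cons] at ih2 ⊢
          have : (pvDec r).2.toNat ≤ r.2.toNat := by
            simp [pvDec]; by_cases hv : 0 < r.2 <;> simp [hv] <;> omega
          omega
      simp only [pvSumC] at this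
      omega
    · have := ih ⟨p, hm, hpos⟩
      omega

lemma pv_tab_step (items : List (String × Int)) (hnn : ∀ p ∈ items, 0 ≤ p.2)
    (hex : ∃ p ∈ items, p.2 ≠ 0) :
    pvTab items = pvRowAt items 0 :: pvTab (items.map pvDec) := by
  obtain ⟨p, hp, hne⟩ := hex
  have hpos : 0 < p.2 := lt_of_le_of_ne (hnn p hp) (Ne.symm hne)
  have hmax : 0 < pvMaxC items := by
    have := pv_mem_le_maxC items p hp
    omega
  unfold pvTab
  rw [pv_maxC_dec items hnn]
  obtain ⟨m, hm⟩ : ∃ m, pvMaxC items = m + 1 := ⟨pvMaxC items - 1, by omega⟩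
  rw [hm]
  rw [List.range_succ_eq_map]
  simp only [List.map_cons, List.map_map]
  congr 1
  simp only [Nat.add_sub_cancel]
  apply List.map_congr_left
  intro j _
  simp only [Function.comp_apply]
  rw [show j.succ = j + 1 from rfl, pv_rowAt_succ items j]


lemma pv_maxC_le_sumC (items : List (String × Int)) : pvMaxC items ≤ pvSumC items := by
  induction items with
  | nil => simp [pvMaxC, pvSumC]
  | cons q items ih =>
    simp only [pvMaxC, pvSumC, List.foldr_cons, List.map_cons, List.sum_cons] at ih ⊢
    omega

lemma pv_fst_map_dec (items : List (String × Int)) :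
    (items.map pvDec).map (·.1) = items.map (·.1) := by
  rw [List.map_map]
  apply List.map_congr_left
  intro p _
  simp [Function.comp, pvDec]
  by_cases hv : 0 < p.2 <;> simp [hv]

lemma pv_axLoop (fuel : Nat) : ∀ (items : List (String × Int)) (acc : List (List String)),
    (items.map (·.1)).Nodup → (∀ p ∈ items, 0 ≤ p.2) → pvSumC items ≤ fuel →
    axLoop fuel (PySem.Dict.mk items) acc = acc ++ pvTab items := by
  induction fuel with
  | zero =>
    intro items acc _ _ hs
    have : pvMaxC items = 0 := by have := pv_maxC_le_sumC items; omega
    simp [axLoop, pvTab, this]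
  | succ fuel ih =>
    intro items acc hnd hnn hs
    rw [axLoop]
    have hvals : (PySem.Dict.mk items).values = items.map (·.2) := rfl
    have hkeys : (PySem.Dict.mk items).keys = items.map (·.1) := rfl
    by_cases hex : ∃ p ∈ items, p.2 ≠ 0
    · have hany : ((PySem.Dict.mk items).values.any (fun v => !(v == 0))) = true := by
        rw [hvals, List.any_eq_true]
        obtain ⟨p, hp, hne⟩ := hex
        exact ⟨p.2, List.mem_map_of_mem hp, by simpa using hne⟩
      rw [if_pos hany, hkeys]
      rw [show PySem.Dict.mk items = PySem.Dict.mk ([] ++ items) from rfl] at *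
      rw [pv_foldl_axStep items [] [] (by simpa using hnd)]
      simp only [List.nil_append]
      have hex' : ∃ p ∈ items, 0 < p.2 := by
        obtain ⟨p, hp, hne⟩ := hex
        exact ⟨p, hp, lt_of_le_of_ne (hnn p hp) (Ne.symm hne)⟩
      rw [ih (items.map pvDec) (acc ++ [(items.filter (fun p => decide (0 < p.2))).map (·.1)])
        (by rw [pv_fst_map_dec]; exact hnd)
        (by intro p hp
            obtain ⟨q, hq, rfl⟩ := List.mem_map.mp hp
            have := hnn q hq
            simp [pvDec]; by_cases hv : 0 < q.2 <;> simp [hv] <;> omega)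
        (by have := pv_sumC_dec items hex'; omega)]
      rw [pv_tab_step items hnn hex]
      have hrow : pvRowAt items 0 = (items.filter (fun p => decide (0 < p.2))).map (·.1) := by
        unfold pvRowAt
        norm_num
      rw [hrow, List.append_assoc, List.singleton_append]
    · push_neg at hex
      have hany : ((PySem.Dict.mk items).values.any (fun v => !(v == 0))) = false := by
        rw [hvals]
        simp only [List.any_eq_false]
        intro v hv
        obtain ⟨p, hp, rfl⟩ := List.mem_map.mp hv
        simpa using hex p hp
      rw [if_neg (by rw [hany]; exact Bool.false_ne_true)]
      have hsum : pvSumC items = 0 := by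
        unfold pvSumC
        apply List.sum_eq_zero
        intro x hx
        obtain ⟨p, hp, rfl⟩ := List.mem_map.mp hx
        rw [hex p hp]
        rfl
      have : pvMaxC items = 0 := by have := pv_maxC_le_sumC items; omega
      simp [pvTab, this]



lemma pv_rowAt_append (pre : List (String × Int)) (k : String) (c : Int) (j : Nat) :
    pvRowAt (pre ++ [(k, c)]) j = pvRowAt pre j ++ (if (j : Int) < c then [k] else []) := by
  unfold pvRowAt
  rw [List.filter_append, List.map_append]
  congr 1
  by_cases h : (j : Int) < c <;> simp [h]

lemma pv_rowAt_ge_max (pre : List (String × Int)) (n : Nat) (h : pvMaxC pre ≤ n) :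
    pvRowAt pre n = [] := by
  unfold pvRowAt
  rw [List.filter_eq_nil_iff.mpr, List.map_nil]
  intro p hp
  have := pv_mem_le_maxC pre p hp
  simp only [decide_eq_true_eq, not_lt]
  omega

lemma pv_set_map_range (m n : Nat) (f : Nat → List String) (v : List String) (h : n < m) :
    ((List.range m).map f).set n v = (List.range m).map (fun j => if j = n then v else f j) := by
  apply List.ext_getElem
  · simp
  · intro j hj1 hj2
    simp only [List.length_set, List.length_map, List.length_range] at hj1
    rw [List.getElem_set]
    simp only [List.getElem_map, List.getElem_range]
    by_cases hjn : j = n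
    · simp [hjn]
    · simp [hjn, Ne.symm hjn]

lemma pv_set_append_last (l : List (List String)) (x v : List String) :
    (l ++ [x]).set l.length v = l ++ [v] := by
  induction l with
  | nil => rfl
  | cons a l ih => simp [List.set_cons_succ, ih]

lemma pv_set_append_last' (l : List (List String)) (x v : List String) (n : Nat)
    (h : l.length = n) : (l ++ [x]).set n v = l ++ [v] := by
  subst h; exact pv_set_append_last l x v

lemma pv_bx_step (pre : List (String × Int)) (k : String) (n : Nat) :
    bxInner k (pvTab (pre ++ [(k, (n : Int))])) (n : Int) = pvTab (pre ++ [(k, (n : Int) + 1)]) := by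
  have hmax1 : pvMaxC (pre ++ [(k, (n : Int))]) = max (pvMaxC pre) n := by
    rw [pv_maxC_append]; simp
  have hmax2 : pvMaxC (pre ++ [(k, (n : Int) + 1)]) = max (pvMaxC pre) (n + 1) := by
    rw [pv_maxC_append, show ((n : Int) + 1).toNat = n + 1 by omega]
  have hlen : (pvTab (pre ++ [(k, (n : Int))])).length = max (pvMaxC pre) n := by
    simp [pvTab, hmax1]
  simp only [bxInner]
  by_cases hMn : pvMaxC pre ≤ n
  · have hlen' : (pvTab (pre ++ [(k, (n : Int))])).length = n := by rw [hlen]; omega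
    rw [if_pos (by rw [hlen'])]
    have hgd : ((pvTab (pre ++ [(k, (n : Int))]) ++ [[]]).getD (n : Int).toNat []) = ([] : List String) := by
      rw [Int.toNat_natCast, List.getD_eq_getElem _ _ (by simp [hlen']),
        List.getElem_append_right (le_of_eq hlen')]
      simp [hlen']
    rw [hgd, Int.toNat_natCast, pv_set_append_last' _ _ _ _ hlen']
    unfold pvTab
    rw [hmax1, hmax2, Nat.max_eq_right hMn, Nat.max_eq_right (by omega : pvMaxC pre ≤ n + 1)]
    rw [List.range_succ, List.map_append, List.map_singleton]
    have h1 : (List.range n).map (pvRowAt (pre ++ [(k, (n : Int))]))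
        = (List.range n).map (pvRowAt (pre ++ [(k, (n : Int) + 1)])) := by
      apply List.map_congr_left
      intro j hj
      rw [List.mem_range] at hj
      rw [pv_rowAt_append, pv_rowAt_append, if_pos (by exact_mod_cast hj), if_pos (by push_cast; omega)]
    have h2 : pvRowAt (pre ++ [(k, (n : Int) + 1)]) n = [] ++ [k] := by
      rw [pv_rowAt_append, pv_rowAt_ge_max pre n hMn, if_pos (by push_cast; omega)]
    rw [h2, h1]
  · have hM : max (pvMaxC pre) n = pvMaxC pre := by omega
    have hcond : ¬ ((n : Int) = ((pvTab (pre ++ [(k, (n : Int))])).length : Int)) := by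
      rw [hlen, hM]
      intro h
      have : n = pvMaxC pre := by exact_mod_cast h
      omega
    rw [if_neg hcond]
    have hgd : (pvTab (pre ++ [(k, (n : Int))])).getD (n : Int).toNat [] = pvRowAt pre n := by
      rw [Int.toNat_natCast, List.getD_eq_getElem _ _ (by rw [hlen, hM]; omega)]
      simp only [pvTab, List.getElem_map, List.getElem_range]
      rw [pv_rowAt_append, if_neg (by simp), List.append_nil]
    rw [hgd, Int.toNat_natCast]
    unfold pvTab
    rw [hmax1, hmax2, hM, Nat.max_eq_left (by omega : n + 1 ≤ pvMaxC pre)]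
    rw [pv_set_map_range _ n _ _ (by omega)]
    apply List.map_congr_left
    intro j hj
    rw [List.mem_range] at hj
    by_cases hjn : j = n
    · subst hjn
      rw [if_pos rfl, pv_rowAt_append, if_pos (by push_cast; omega)]
    · rw [if_neg hjn, pv_rowAt_append, pv_rowAt_append]
      congr 1
      by_cases hlt : (j : Int) < (n : Int)
      · rw [if_pos hlt, if_pos (by push_cast at hlt ⊢; omega)]
      · rw [if_neg hlt, if_neg (by push_cast at hlt ⊢; omega)]

lemma pv_bx_fold (pre : List (String × Int)) (k : String) (c : Int) (hc : 0 ≤ c) :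
    (PySem.List.pyRange 0 c 1).foldl (bxInner k) (pvTab pre) = pvTab (pre ++ [(k, c)]) := by
  obtain ⟨n, rfl⟩ : ∃ n : Nat, c = (n : Int) := ⟨c.toNat, by omega⟩
  clear hc
  induction n with
  | zero =>
    rw [PySem.List.pyRange_one_eq_nil (by norm_num), List.foldl_nil]
    unfold pvTab
    rw [pv_maxC_append, show ((0 : Nat) : Int).toNat = 0 from rfl, Nat.max_zero]
    apply List.map_congr_left
    intro j _
    rw [pv_rowAt_append, if_neg (by omega), List.append_nil]
  | succ n ih =>
    rw [show ((n + 1 : Nat) : Int) = (n : Int) + 1 by push_cast; ring]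
    rw [PySem.List.pyRange_one_succ_right (by omega), List.foldl_append]
    rw [ih, List.foldl_cons, List.foldl_nil]
    exact pv_bx_step pre k n

lemma pv_bx_main (items : List (String × Int)) (h : ∀ p ∈ items, 0 ≤ p.2) :
    items.foldl (fun rows p => (PySem.List.pyRange 0 p.2 1).foldl (bxInner p.1) rows) []
      = pvTab items := by
  induction items using List.reverseRecOn with
  | nil => rfl
  | append_singleton init p ih =>
    rw [List.foldl_append, List.foldl_cons, List.foldl_nil]
    rw [ih (fun q hq => h q (List.mem_append_left _ hq))]
    obtain ⟨k, c⟩ := p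
    exact pv_bx_fold init k c (h (k, c) (List.mem_append_right _ (List.mem_singleton_self _)))

lemma pv_counter_facts (c : List String) :
    (((PySem.Dict.counter c : PySem.Dict String Int).items.map (·.1)).Nodup) ∧
    (∀ p ∈ (PySem.Dict.counter c : PySem.Dict String Int).items, 0 ≤ p.2) ∧
    pvSumC (PySem.Dict.counter c : PySem.Dict String Int).items ≤ c.length := by
  have hitems := PySem.Dict.items_counter (xs := c)
  refine ⟨?_, ?_, ?_⟩
  · have := PySem.Dict.nodup_keys_counter (xs := c)
    exact this
  · intro p hp
    rw [hitems] at hp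
    obtain ⟨k, _, rfl⟩ := List.mem_map.mp hp
    positivity
  · rw [hitems]
    unfold pvSumC
    rw [List.map_map]
    have hmapeq : ((fun p : String × Int => p.2.toNat) ∘ fun k => (k, (c.count k : Int)))
        = fun k => c.count k := by
      funext k; simp
    rw [hmapeq]
    have hperm : (PySem.Set.ofList c).Perm c.dedup := by
      apply (List.perm_ext_iff_of_nodup (PySem.Set.nodup_ofList c) c.nodup_dedup).mpr
      intro x
      rw [PySem.Set.mem_ofList, List.mem_dedup]
    rw [(hperm.map (fun k => c.count k)).sum_eq]
    rw [List.sum_map_count_dedup_eq_length]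


theorem pv_final (c : List String) : organize_exhibition c = organize_exhibition_alt c := by
  obtain ⟨hnd, hnn, hs⟩ := pv_counter_facts c
  unfold organize_exhibition organize_exhibition_alt
  rw [pv_bx_main _ hnn]
  rw [show (PySem.Dict.counter c : PySem.Dict String Int)
      = PySem.Dict.mk (PySem.Dict.counter c : PySem.Dict String Int).items from rfl]
  exact pv_axLoop c.length _ [] hnd hnn hs

-- ===== VERDICT (by name: the statement is the Claim_ definition above) =====
theorem organize_exhibition_spec : Claim_equal_organize_exhibition := by
  intro collection _
  exact pv_final collection
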